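-- pv_equiv track=rewrite | github.com/twobackfromtheend/quRL | quantum_evolution/simulations/protocol_evaluator.py | get_h_list
-- ===== SOURCE A (Python) =====
-- from typing import Sequence, Callable, Any
--
-- def get_h_list(protocol: Sequence[int]) -> Sequence[int]:
--     """
--     Gets a list of h_x's for the given protocol.
--     :param protocol:
--     :return:
--     """
--     h_list = []
--     current_h_x = -4
--
--     for i in range(len(protocol)):
--         if protocol[i] == 1:
--             current_h_x *= -1
--         h_list.append(current_h_x)
--
--     return h_list
-- ===== SOURCE B (Python) =====
-- from itertools import accumulate
--
-- def get_h_list(protocol):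
--     """
--     Gets a list of h_x's for the given protocol.
--     :param protocol:
--     :return:
--     """
--     counts = accumulate(1 if x == 1 else 0 for x in protocol)
--     return [-4 if c % 2 == 0 else 4 for c in counts]
-- ===== Notes on version B (the rewrite author's own statement) =====
-- stated objective: alternative
-- what changed: Replaces the single loop maintaining a mutable toggled sign with a two-phase pipeline: accumulate a running count of ones, then map each prefix parity to -4 (even) or 4 (odd).
import Mathlib
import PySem

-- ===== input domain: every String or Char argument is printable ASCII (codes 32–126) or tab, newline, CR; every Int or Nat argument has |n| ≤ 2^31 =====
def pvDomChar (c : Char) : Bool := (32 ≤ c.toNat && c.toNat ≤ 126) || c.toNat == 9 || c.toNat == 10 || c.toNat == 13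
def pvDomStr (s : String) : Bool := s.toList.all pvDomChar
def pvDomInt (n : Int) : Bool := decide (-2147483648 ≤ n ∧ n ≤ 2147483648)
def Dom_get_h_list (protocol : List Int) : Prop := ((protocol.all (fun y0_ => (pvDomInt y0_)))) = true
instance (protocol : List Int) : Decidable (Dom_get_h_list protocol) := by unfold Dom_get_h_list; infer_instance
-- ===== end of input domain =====

-- B restructures A's single sign-toggling loop into a prefix-count-of-ones pass followed by a parity-to-value map (objective: alternative decomposition, same cost).

-- ===== PORT A =====
-- loop over the protocol, toggling current_h_x when the element equals 1, appending it each step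
def get_h_list (protocol : List Int) : List Int :=
  (protocol.foldl
    (fun (st : List Int × Int) x =>
      let h := if x = 1 then st.2 * (-1) else st.2
      (st.1 ++ [h], h))
    (([] : List Int), (-4 : Int))).1

-- ===== PORT B =====
-- running count of ones (itertools.accumulate of 1-if-x==1-else-0)
def pvPrefixOnes : List Int → Int → List Int
  | [], _ => []
  | x :: xs, c =>
    let c' := c + (if x = 1 then 1 else 0)
    c' :: pvPrefixOnes xs c'

def get_h_list_alt (protocol : List Int) : List Int :=
  (pvPrefixOnes protocol 0).map (fun c => if c % 2 = 0 then -4 else 4)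

-- ===== PRECONDITION & SPEC =====
def Spec_get_h_list (protocol : List Int) (out : List Int) : Prop := out = get_h_list_alt protocol
instance (protocol : List Int) (out : List Int) : Decidable (Spec_get_h_list protocol out) := by unfold Spec_get_h_list; infer_instance

-- ===== CLAIM (what is proved, stated in full; the proofs are below) =====
def Claim_equal_get_h_list : Prop := ∀ (protocol : List Int), Dom_get_h_list protocol → Spec_get_h_list protocol (get_h_list protocol)

-- ===== LEMMAS AND PROOFS =====
theorem pv_loop_eq (xs : List Int) (acc : List Int) (c h : Int)
    (hh : h = if c % 2 = 0 then -4 else 4) :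
    (xs.foldl
      (fun (st : List Int × Int) x =>
        let h := if x = 1 then st.2 * (-1) else st.2
        (st.1 ++ [h], h))
      (acc, h)).1
    = acc ++ (pvPrefixOnes xs c).map (fun c => if c % 2 = 0 then -4 else 4) := by
  induction xs generalizing acc c h with
  | nil => simp [pvPrefixOnes]
  | cons x xs ih =>
    simp only [List.foldl, pvPrefixOnes, List.map]
    by_cases hx : x = 1
    · have hh' : (if x = 1 then h * (-1) else h) = (if (c + 1) % 2 = 0 then (-4 : Int) else 4) := by
        subst hh; split_ifs <;> omega
      rw [ih _ (c + 1) _ hh']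
      simp [hx]
      subst hh; split_ifs <;> omega
    · have hh' : (if x = 1 then h * (-1) else h) = (if c % 2 = 0 then (-4 : Int) else 4) := by
        subst hh; split_ifs <;> omega
      rw [ih _ c _ hh']
      simp [hx]
      subst hh; split_ifs <;> omega

-- ===== VERDICT (by name: the statement is the Claim_ definition above) =====
theorem get_h_list_spec : Claim_equal_get_h_list := by
  intro protocol _
  unfold Spec_get_h_list get_h_list get_h_list_alt
  simpa using pv_loop_eq protocol [] 0 (-4) (by norm_num)
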